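-- pv_equiv track=rewrite | github.com/lgelmi/advent_of_code | 2020/day10/day10.py | count_combination
-- ===== SOURCE A (Python) =====
-- import operator
-- from collections import Counter
-- from functools import reduce
-- from typing import List, Set, Dict, Tuple
--
-- def jolt_steps(values: List[int]) -> List[int]:
--     diff = [right - left for left, right in zip(values, values[1:])]
--     diff.insert(0, values[0])
--     diff.append(3)
--     return diff
--
-- combination_count = {1: 1, 2: 2, 3: 4}
--
-- def get_combination_count(consecutive_ones):
--     if consecutive_ones <= 0:
--         return 1
--     if consecutive_ones in combination_count:
--         return combination_count[consecutive_ones]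
--
--     new_starts = get_combination_count(consecutive_ones - 1) * 2 - 1
--     combination_count[consecutive_ones] = new_starts
--     return new_starts
--
-- def count_consecutive_element(values, element) -> Counter:
--     counter = Counter()
--     count = 0
--     for value in values:
--         if value == element:
--             count += 1
--         else:
--             counter[count] += 1
--             count = 0
--     return counter
--
-- def count_combination(values: List[int]) -> int:
--     consecutive_ones = count_consecutive_element(jolt_steps(values), 1)
--     return reduce(
--         operator.mul,
--         (
--             get_combination_count(length) ** count
--             for length, count in consecutive_ones.items()
--         )
--     )
-- ===== SOURCE B (Python) =====
-- def ccount(n):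
--     # closed form of A's recurrence: 1,1,2, then ccount(k)=2*ccount(k-1)-1 => 3*2**(k-3)+1 for k>=3
--     if n <= 1:
--         return 1
--     if n == 2:
--         return 2
--     return 3 * 2 ** (n - 3) + 1
--
--
-- def count_combination(values):
--     diffs = [values[0]] + [b - a for a, b in zip(values, values[1:])] + [3]
--     product = 1
--     run = 0
--     for d in diffs:
--         if d == 1:
--             run += 1
--         else:
--             product *= ccount(run)
--             run = 0
--     return product
-- ===== Notes on version B (the rewrite author's own statement) =====
-- stated objective: simpler
-- what changed: Replaces the Counter-of-run-lengths plus reduce-of-powers pipeline and the memoized recursive combination count with a single pass over the diff list that multiplies a running product by a closed-form per-run factor (3*2^(n-3)+1).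
import Mathlib
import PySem

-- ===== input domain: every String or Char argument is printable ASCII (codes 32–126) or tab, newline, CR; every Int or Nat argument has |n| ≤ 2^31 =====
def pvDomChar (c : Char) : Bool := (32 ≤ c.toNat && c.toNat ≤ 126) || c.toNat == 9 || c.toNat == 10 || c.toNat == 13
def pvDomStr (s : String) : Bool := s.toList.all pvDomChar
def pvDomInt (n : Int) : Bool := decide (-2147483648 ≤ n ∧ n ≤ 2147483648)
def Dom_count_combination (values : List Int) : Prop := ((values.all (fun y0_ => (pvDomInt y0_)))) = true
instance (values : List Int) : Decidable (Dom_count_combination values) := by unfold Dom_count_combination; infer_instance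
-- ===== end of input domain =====

-- B replaces A's Counter-of-run-lengths + reduce-of-powers and memoized recursion with a
-- single pass over the diff list multiplying a running product by a closed-form per-run factor (simpler).


-- ===== PORT A =====
-- get_combination_count: the Python memo dict {1:1,2:2,3:4} only caches the values of this
-- recursion, so the port is the recursion itself (value-identical; the cache affects speed only).
def pvGcc (n : Int) : Int :=
  if _h0 : n ≤ 0 then 1
  else if n = 1 then 1
  else if n = 2 then 2
  else if n = 3 then 4
  else 2 * pvGcc (n - 1) - 1
termination_by n.toNat
decreasing_by omega

-- count_consecutive_element(.., 1): fold over the values with state (Counter, current run length)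
def pvStepA (s : PySem.Dict Int Int × Int) (v : Int) : PySem.Dict Int Int × Int :=
  if v = 1 then (s.1, s.2 + 1) else (s.1.modify s.2 0 (· + 1), 0)

-- count_combination: jolt_steps inlined (values[0] raises IndexError on [], hence the match on pyGet?);
-- reduce(mul, powers) with no initial value = fold starting from the first item's power.
-- '** count' has count ≥ 1 here, so '^ count.toNat' is exact.
def count_combination (values : List Int) : Int :=
  match PySem.List.pyGet? values 0 with
  | none => 0  -- unreachable under Pre_: Python raises IndexError
  | some v0 =>
    let diff := v0 :: ((values.zip (values.drop 1)).map (fun p => p.2 - p.1) ++ [3])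
    let counter := (diff.foldl pvStepA (PySem.Dict.empty, 0)).1
    match counter.items with
    | [] => 0  -- unreachable: reduce on an empty iterable raises; the counter is never empty
    | p :: rest => rest.foldl (fun acc q => acc * pvGcc q.1 ^ q.2.toNat) (pvGcc p.1 ^ p.2.toNat)

-- ===== PORT B =====
-- closed form of the combination count
def pvCc (n : Int) : Int :=
  if n ≤ 1 then 1 else if n = 2 then 2 else 3 * 2 ^ (n - 3).toNat + 1

def count_combination_alt (values : List Int) : Int :=
  match PySem.List.pyGet? values 0 with
  | none => 0  -- unreachable under Pre_: Python raises IndexError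
  | some v0 =>
    let diffs := v0 :: ((values.zip (values.drop 1)).map (fun p => p.2 - p.1) ++ [3])
    (diffs.foldl (fun (s : Int × Int) d =>
        if d = 1 then (s.1, s.2 + 1) else (s.1 * pvCc s.2, 0)) (1, 0)).1

-- ===== PRECONDITION & SPEC =====
-- Pre_ excludes only the empty list, on which both Pythons raise IndexError (values[0]).
def Pre_count_combination (values : List Int) : Prop := values ≠ []
instance (values : List Int) : Decidable (Pre_count_combination values) := by
  unfold Pre_count_combination; infer_instance
def pvWitness_count_combination : List Int := [1, 2, 3]

def Spec_count_combination (values : List Int) (out : Int) : Prop := out = count_combination_alt values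
instance (values : List Int) (out : Int) : Decidable (Spec_count_combination values out) := by unfold Spec_count_combination; infer_instance

-- ===== CLAIM (what is proved, stated in full; the proofs are below) =====
def Claim_equal_count_combination : Prop := ∀ (values : List Int), Dom_count_combination values → Pre_count_combination values → Spec_count_combination values (count_combination values)

-- ===== LEMMAS AND PROOFS =====

-- the sequence of run lengths flushed while scanning ds with current run length r
def pvFlush (ds : List Int) (r : Int) : List Int :=
  match ds with
  | [] => []
  | d :: ds => if d = 1 then pvFlush ds (r + 1) else r :: pvFlush ds 0

theorem pvGcc_eq_pvCc (n : Int) : pvGcc n = pvCc n := by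
  by_cases h : n ≤ 2
  · rcases lt_trichotomy n 1 with h1 | h1 | h1
    · rw [pvGcc.eq_def, dif_pos (by omega : n ≤ 0)]
      unfold pvCc
      rw [if_pos (by omega : n ≤ 1)]
    · rw [h1, pvGcc.eq_def]; norm_num [pvCc]
    · have h2 : n = 2 := by omega
      rw [h2, pvGcc.eq_def]; norm_num [pvCc]
  · -- n ≥ 3: induction on (n - 3).toNat
    obtain ⟨k, hk⟩ : ∃ k : Nat, n = 3 + (k : Int) := ⟨(n - 3).toNat, by omega⟩
    replace h : 2 < n := lt_of_not_ge h
    subst hk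
    induction k with
    | zero =>
      rw [show (3 + ((0 : Nat) : Int)) = 3 by norm_num, pvGcc.eq_def]
      norm_num [pvCc]
    | succ m ih =>
      have hrec : pvGcc (3 + ((m + 1 : Nat) : Int)) = 2 * pvGcc (3 + (m : Int)) - 1 := by
        rw [pvGcc.eq_def]
        rw [dif_neg (by push_cast; omega), if_neg (by push_cast; omega),
          if_neg (by push_cast; omega), if_neg (by push_cast; omega)]
        have harg : (3 + ((m + 1 : Nat) : Int) - 1) = 3 + (m : Int) := by push_cast; ring
        rw [harg]
      rw [hrec, ih (by push_cast; omega)]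
      unfold pvCc
      rw [if_neg (by push_cast; omega), if_neg (by push_cast; omega),
        if_neg (by omega), if_neg (by omega)]
      have he : (3 + ((m + 1 : Nat) : Int) - 3).toNat = (3 + (m : Int) - 3).toNat + 1 := by
        push_cast; omega
      rw [he, pow_succ]
      ring

theorem pvFoldA (ds : List Int) (d : PySem.Dict Int Int) (r : Int) :
    (ds.foldl pvStepA (d, r)).1 =
      (pvFlush ds r).foldl (fun d x => d.modify x 0 (· + 1)) d := by
  induction ds generalizing d r with
  | nil => simp [pvFlush]
  | cons v ds ih =>
    by_cases hv : v = 1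
    · simp [pvFlush, pvStepA, hv, ih]
    · simp [pvFlush, pvStepA, hv, ih]

theorem pvFoldB (ds : List Int) (p r : Int) :
    (ds.foldl (fun (s : Int × Int) d =>
        if d = 1 then (s.1, s.2 + 1) else (s.1 * pvCc s.2, 0)) (p, r)).1 =
      p * ((pvFlush ds r).map pvCc).prod := by
  induction ds generalizing p r with
  | nil => simp [pvFlush]
  | cons v ds ih =>
    by_cases hv : v = 1
    · simp [pvFlush, hv, ih]
    · simp only [List.foldl_cons, if_neg hv, pvFlush, ih]
      rw [List.map_cons, List.prod_cons]
      ring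

theorem pvFlush_ne_nil (ds : List Int) (e r : Int) (he : e ≠ 1) :
    pvFlush (ds ++ [e]) r ≠ [] := by
  induction ds generalizing r with
  | nil => simp [pvFlush, he]
  | cons d ds ih =>
    by_cases hd : d = 1
    · simpa [pvFlush, hd] using ih (r + 1)
    · simp [pvFlush, hd]

-- bumping one entry of a nodup list multiplies the mapped product by c
theorem pvProdMapUpdate (s : List Int) (f f' : Int → Int) (x c : Int)
    (hnd : s.Nodup) (hx : x ∈ s)
    (hne : ∀ k ∈ s, k ≠ x → f' k = f k) (hfx : f' x = f x * c) :
    (s.map f').prod = (s.map f).prod * c := by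
  induction s with
  | nil => simp at hx
  | cons a s ih =>
    rcases List.mem_cons.mp hx with h | h
    · subst h
      have : ∀ k ∈ s, f' k = f k := fun k hk =>
        hne k (List.mem_cons_of_mem _ hk) (by rintro rfl; exact (List.nodup_cons.mp hnd).1 hk)
      simp [List.map_congr_left this, hfx]
      ring
    · have ha : a ≠ x := by rintro rfl; exact (List.nodup_cons.mp hnd).1 h
      rw [List.map_cons, List.map_cons, List.prod_cons, List.prod_cons,
        hne a (List.mem_cons_self) ha,
        ih (List.nodup_cons.mp hnd).2 h (fun k hk => hne k (List.mem_cons_of_mem _ hk))]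
      ring

-- product over the counter's (key, count) pairs of g key ^ count = product of g over the list
theorem pvCounterProd (xs : List Int) (g : Int → Int) :
    ((PySem.Set.ofList xs).map (fun k => g k ^ xs.count k)).prod = (xs.map g).prod := by
  induction xs using List.reverseRecOn with
  | nil => simp [PySem.Set.ofList]
  | append_singleton xs x ih =>
    rw [PySem.Set.ofList_append_singleton]
    by_cases hx : x ∈ xs
    · have hxs : x ∈ PySem.Set.ofList xs := (PySem.Set.mem_ofList xs x).mpr hx
      have hct : PySem.Set.contains (PySem.Set.ofList xs) x = true :=
        (PySem.Set.contains_iff (PySem.Set.ofList xs) x).mpr hxs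
      have hadd : PySem.Set.add (PySem.Set.ofList xs) x = PySem.Set.ofList xs := by
        unfold PySem.Set.add
        rw [if_pos hct]
      rw [hadd]
      rw [pvProdMapUpdate (PySem.Set.ofList xs)
            (fun k => g k ^ xs.count k) (fun k => g k ^ (xs ++ [x]).count k) x (g x)
            (PySem.Set.nodup_ofList xs) hxs
            (fun k _ hk => by simp only [List.count_append, List.count_singleton]; rw [if_neg (fun he => hk (eq_of_beq he).symm), add_zero])
            (by simp only [List.count_append, List.count_singleton]; rw [if_pos (beq_self_eq_true x), pow_succ])]
      rw [ih]; simp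
    · have hxs : x ∉ PySem.Set.ofList xs := fun h => hx ((PySem.Set.mem_ofList _ _).mp h)
      have hcf : ¬ (PySem.Set.contains (PySem.Set.ofList xs) x = true) :=
        fun h => hxs ((PySem.Set.contains_iff _ _).mp h)
      have hadd : PySem.Set.add (PySem.Set.ofList xs) x = PySem.Set.ofList xs ++ [x] := by
        simp only [PySem.Set.add, if_neg hcf]
      rw [hadd, List.map_append, List.prod_append, List.map_append, List.prod_append]
      have hc : ∀ k ∈ PySem.Set.ofList xs, g k ^ (xs ++ [x]).count k = g k ^ xs.count k := by
        intro k hk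
        have hkx : k ≠ x := fun he => hx (he ▸ (PySem.Set.mem_ofList _ _).mp hk)
        simp only [List.count_append, List.count_singleton]
        rw [if_neg (fun he => hkx (eq_of_beq he).symm), add_zero]
      rw [List.map_congr_left hc, ih]
      simp [List.count_append, List.count_singleton, List.count_eq_zero_of_not_mem hx]

-- the whole pipeline, for any diff list ending in a non-1 element
theorem pvMain (ds : List Int) (e : Int) (he : e ≠ 1) :
    (match (((ds ++ [e]).foldl pvStepA (PySem.Dict.empty, 0)).1).items with
      | [] => (0 : Int)
      | p :: rest => rest.foldl (fun acc q => acc * pvGcc q.1 ^ q.2.toNat) (pvGcc p.1 ^ p.2.toNat)) =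
    ((ds ++ [e]).foldl (fun (s : Int × Int) d =>
        if d = 1 then (s.1, s.2 + 1) else (s.1 * pvCc s.2, 0)) (1, 0)).1 := by
  have hFne : pvFlush (ds ++ [e]) 0 ≠ [] := pvFlush_ne_nil ds e 0 he
  obtain ⟨f0, F', hF'⟩ := List.exists_cons_of_ne_nil hFne
  have hdict : ((ds ++ [e]).foldl pvStepA (PySem.Dict.empty, 0)).1 =
      PySem.Dict.counter (pvFlush (ds ++ [e]) 0) := by
    rw [pvFoldA, PySem.Dict.counter_eq_foldl]
  rw [hdict, pvFoldB, one_mul]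
  have hitems := PySem.Dict.items_counter (pvFlush (ds ++ [e]) 0)
  have hne : (PySem.Dict.counter (pvFlush (ds ++ [e]) 0)).items ≠ [] := by
    rw [hitems]
    intro h
    have h2 := List.map_eq_nil_iff.mp h
    have h3 : f0 ∈ PySem.Set.ofList (pvFlush (ds ++ [e]) 0) := by
      rw [PySem.Set.mem_ofList, hF']; exact List.mem_cons_self
    rw [h2] at h3
    simp at h3
  obtain ⟨p, rest, hpr⟩ := List.exists_cons_of_ne_nil hne
  rw [hpr]
  show rest.foldl (fun acc q => acc * pvGcc q.1 ^ q.2.toNat) (pvGcc p.1 ^ p.2.toNat) = _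
  have hred : rest.foldl (fun acc q => acc * pvGcc q.1 ^ q.2.toNat) (pvGcc p.1 ^ p.2.toNat) =
      (p :: rest).foldl (fun acc q => acc * pvGcc q.1 ^ q.2.toNat) 1 := by
    simp
  rw [hred, ← hpr, hitems, List.foldl_map]
  simp only [Int.toNat_natCast]
  have hfold : ((PySem.Set.ofList (pvFlush (ds ++ [e]) 0)).map
      (fun k => pvGcc k ^ (pvFlush (ds ++ [e]) 0).count k)).prod =
      (PySem.Set.ofList (pvFlush (ds ++ [e]) 0)).foldl
        (fun a k => a * pvGcc k ^ (pvFlush (ds ++ [e]) 0).count k) 1 := by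
    rw [List.prod_eq_foldl, List.foldl_map]
  rw [← hfold, pvCounterProd]
  congr 1
  exact List.map_congr_left fun k _ => pvGcc_eq_pvCc k

-- ===== VERDICT (by name: the statement is the Claim_ definition above) =====
theorem count_combination_spec : Claim_equal_count_combination := by
  intro values _hdom hpre
  unfold Spec_count_combination
  obtain ⟨v0, vs, hv⟩ := List.exists_cons_of_ne_nil hpre
  subst hv
  have hget : PySem.List.pyGet? (v0 :: vs) 0 = some v0 := by
    simp [PySem.List.pyGet?, PySem.List.pyIdx?]
  simp only [count_combination, count_combination_alt, hget]
  have h3 : (v0 :: (((v0 :: vs).zip ((v0 :: vs).drop 1)).map (fun p => p.2 - p.1) ++ [3])) =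
      (v0 :: ((v0 :: vs).zip ((v0 :: vs).drop 1)).map (fun p => p.2 - p.1)) ++ [3] := by
    simp
  rw [h3]
  exact pvMain _ 3 (by decide)
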